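-- pv_equiv track=rewrite | github.com/dumpstate/advent-of-code | 2020/day14.py | apply_combination
-- ===== SOURCE A (Python) =====
-- from typing import Dict, Iterator, List, Tuple, cast
--
-- def binary_to_decimal(num: str) -> int:
--     res = 0
--
--     for i in range(len(num) - 1, -1, -1):
--         res += int(num[i]) * pow(2, len(num) - i - 1)
--
--     return res
--
-- def apply_combination(masked: str, combination: Tuple[int, ...]) -> int:
--     res = ""
--     ix = 0
--
--     for bit in masked:
--         if bit == "X":
--             res += str(combination[ix])
--             ix += 1
--         else:
--             res += bit
--
--     return binary_to_decimal(res)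
-- ===== SOURCE B (Python) =====
-- def apply_combination(masked, combination):
--     res = 0
--     ix = 0
--     for bit in masked:
--         if bit == "X":
--             res = res * 2 + combination[ix]
--             ix += 1
--         else:
--             res = res * 2 + int(bit)
--     return res
-- ===== Notes on version B (the rewrite author's own statement) =====
-- stated objective: simpler
-- what changed: Replaces A's two-pass structure (build a binary string, then a second indexed pass with pow() in binary_to_decimal) by a single pass accumulating res = res*2 + bit directly, with no intermediate string and no powers.
-- outside the precondition, e.g. on apply_combination('X', (12,)): A returns 4, B returns 12
import Mathlib
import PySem

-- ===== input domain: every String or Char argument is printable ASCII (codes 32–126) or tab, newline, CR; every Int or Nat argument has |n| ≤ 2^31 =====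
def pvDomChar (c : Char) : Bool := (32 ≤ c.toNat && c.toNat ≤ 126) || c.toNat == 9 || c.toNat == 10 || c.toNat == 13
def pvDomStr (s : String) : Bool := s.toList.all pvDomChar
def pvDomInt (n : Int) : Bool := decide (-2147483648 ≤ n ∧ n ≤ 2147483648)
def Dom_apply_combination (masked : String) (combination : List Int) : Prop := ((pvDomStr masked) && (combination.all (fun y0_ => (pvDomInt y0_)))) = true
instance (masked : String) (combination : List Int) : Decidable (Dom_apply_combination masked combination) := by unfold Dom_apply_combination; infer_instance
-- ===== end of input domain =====

-- B replaces A's build-binary-string pass + indexed pow-based conversion pass by one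
-- accumulating pass (res = res*2 + bit); objective: simpler (no string building, no pow).

-- ===== PORT A =====
-- int(c) for a single character c (raises → none → excluded by Pre_)
def pvDigit? (c : Char) : Option Int := PySem.Int.ofChars? [c]

-- literal port of binary_to_decimal: for i in range(len(num)-1,-1,-1): res += int(num[i]) * 2^(len-i-1)
def pvBinaryToDecimal (num : List Char) : Int :=
  (PySem.List.pyRange ((num.length : Int) - 1) (-1) (-1)).foldl
    (fun res i =>
      res + ((PySem.List.pyGet? num i).bind pvDigit?).getD 0 * 2 ^ (((num.length : Int) - i - 1).toNat)) 0

def apply_combination (masked : String) (combination : List Int) : Int :=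
  let st := masked.toList.foldl
    (fun (st : List Char × Int) bit =>
      if bit = 'X' then
        (st.1 ++ PySem.Int.toChars ((PySem.List.pyGet? combination st.2).getD 0), st.2 + 1)
      else
        (st.1 ++ [bit], st.2)) ([], 0)
  pvBinaryToDecimal st.1

-- ===== PORT B =====
def apply_combination_alt (masked : String) (combination : List Int) : Int :=
  (masked.toList.foldl
    (fun (st : Int × Int) bit =>
      if bit = 'X' then
        (st.1 * 2 + (PySem.List.pyGet? combination st.2).getD 0, st.2 + 1)
      else
        (st.1 * 2 + (pvDigit? bit).getD 0, st.2)) (0, 0)).1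

-- ===== PRECONDITION & SPEC =====
-- Pre_ is the task's natural domain (a binary mask and bit values): every masked character is
-- a binary/decimal digit or 'X' (otherwise int() raises ValueError in A), there are enough
-- combination entries for the 'X's (otherwise A raises IndexError), and each CONSUMED
-- combination entry is a single decimal digit 0..9 — consumed entries outside 0..9 are outside
-- the bit domain: negative ones make A raise ValueError, and on multi-digit ones A's splicing
-- of the decimal digit string into the binary string and B's direct addition are both
-- unspecified extrapolations.
def Pre_apply_combination (masked : String) (combination : List Int) : Prop :=
  (masked.toList.all (fun c => c = 'X' || ('0' ≤ c && c ≤ '9'))) = true ∧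
  ((combination.take (masked.toList.count 'X')).all (fun v => 0 ≤ v && v ≤ 9)) = true ∧
  masked.toList.count 'X' ≤ combination.length
instance (masked : String) (combination : List Int) : Decidable (Pre_apply_combination masked combination) := by unfold Pre_apply_combination; infer_instance

def pvWitness_apply_combination : String × List Int := ("1X0X", [1, 0])

def Spec_apply_combination (masked : String) (combination : List Int) (out : Int) : Prop := out = apply_combination_alt masked combination
instance (masked : String) (combination : List Int) (out : Int) : Decidable (Spec_apply_combination masked combination out) := by unfold Spec_apply_combination; infer_instance

-- ===== CLAIM (what is proved, stated in full; the proofs are below) =====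
def Claim_equal_apply_combination : Prop := ∀ (masked : String) (combination : List Int), Dom_apply_combination masked combination → Pre_apply_combination masked combination → Spec_apply_combination masked combination (apply_combination masked combination)

-- ===== LEMMAS AND PROOFS =====

-- Horner evaluation of a digit string (B's accumulator restricted to a fixed string).
def pvHorner (l : List Char) : Int := l.foldl (fun r c => r * 2 + (pvDigit? c).getD 0) 0

theorem pvHorner_aux_eq (l : List Char) : ∀ a : Int,
    l.foldl (fun r c => r * 2 + (pvDigit? c).getD 0) a
      = a * 2 ^ l.length +
        ((List.range l.length).map
          (fun k => ((l[k]?.bind pvDigit?).getD 0) * 2 ^ (l.length - 1 - k))).sum := by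
  induction l with
  | nil => intro a; simp
  | cons c t ih =>
    intro a
    simp only [List.foldl_cons, List.length_cons, List.range_succ_eq_map, List.map_cons,
      List.map_map, List.sum_cons]
    rw [ih]
    have h3 : ∀ (f g : Nat → Int), (∀ k, k ∈ List.range t.length → f (Nat.succ k) = g k) →
        ((List.range t.length).map (f ∘ Nat.succ)).sum = ((List.range t.length).map g).sum := by
      intro f g h
      congr 1
      refine List.map_congr_left ?_
      intro k hk
      exact h k hk
    rw [h3 _ (fun k => ((t[k]?.bind pvDigit?).getD 0) * 2 ^ (t.length - 1 - k))
        (fun k _ => by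
          simp only [Nat.succ_eq_add_one, List.getElem?_cons_succ]
          congr 2
          omega)]
    simp only [List.getElem?_cons_zero, Option.bind_some, Nat.add_sub_cancel, Nat.sub_zero]
    rw [pow_succ]
    ring

theorem pvBinaryToDecimal_eq_horner (num : List Char) :
    pvBinaryToDecimal num = pvHorner num := by
  unfold pvBinaryToDecimal pvHorner
  rw [PySem.List.foldl_add (g := fun i =>
    ((PySem.List.pyGet? num i).bind pvDigit?).getD 0 * 2 ^ (((num.length : Int) - i - 1).toNat))]
  have hrev : PySem.List.pyRange ((num.length : Int) - 1) (-1) (-1)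
      = (PySem.List.pyRange 0 (num.length : Int) 1).reverse := by
    have := PySem.List.pyRange_neg_one_eq_reverse ((num.length : Int) - 1) (-1)
    simpa using this
  rw [hrev, List.map_reverse, List.sum_reverse]
  rw [PySem.List.pyRange_zero_natCast]
  rw [List.map_map]
  rw [pvHorner_aux_eq]
  simp only [zero_mul, zero_add]
  congr 1
  refine List.map_congr_left ?_
  intro k hk
  have hk' : k < num.length := List.mem_range.mp hk
  simp only [Function.comp_apply, PySem.List.pyGet?_natCast]
  congr 2
  omega

-- int(str(v)) round-trips for single-digit v, as a Horner step.
theorem pvHorner_append_toChars (s : List Char) (v : Int) (h0 : 0 ≤ v) (h9 : v ≤ 9) :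
    pvHorner (s ++ PySem.Int.toChars v) = pvHorner s * 2 + v := by
  have t0 : PySem.Int.toChars 0 = ['0'] := by decide
  have t1 : PySem.Int.toChars 1 = ['1'] := by decide
  have t2 : PySem.Int.toChars 2 = ['2'] := by decide
  have t3 : PySem.Int.toChars 3 = ['3'] := by decide
  have t4 : PySem.Int.toChars 4 = ['4'] := by decide
  have t5 : PySem.Int.toChars 5 = ['5'] := by decide
  have t6 : PySem.Int.toChars 6 = ['6'] := by decide
  have t7 : PySem.Int.toChars 7 = ['7'] := by decide
  have t8 : PySem.Int.toChars 8 = ['8'] := by decide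
  have t9 : PySem.Int.toChars 9 = ['9'] := by decide
  have d0 : (pvDigit? '0').getD 0 = (0 : Int) := by decide
  have d1 : (pvDigit? '1').getD 0 = (1 : Int) := by decide
  have d2 : (pvDigit? '2').getD 0 = (2 : Int) := by decide
  have d3 : (pvDigit? '3').getD 0 = (3 : Int) := by decide
  have d4 : (pvDigit? '4').getD 0 = (4 : Int) := by decide
  have d5 : (pvDigit? '5').getD 0 = (5 : Int) := by decide
  have d6 : (pvDigit? '6').getD 0 = (6 : Int) := by decide
  have d7 : (pvDigit? '7').getD 0 = (7 : Int) := by decide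
  have d8 : (pvDigit? '8').getD 0 = (8 : Int) := by decide
  have d9 : (pvDigit? '9').getD 0 = (9 : Int) := by decide
  unfold pvHorner
  rw [List.foldl_append]
  interval_cases v <;>
    simp [t0, t1, t2, t3, t4, t5, t6, t7, t8, t9, d0, d1, d2, d3, d4, d5, d6, d7, d8, d9]

theorem pvHorner_append_singleton (s : List Char) (c : Char) :
    pvHorner (s ++ [c]) = pvHorner s * 2 + (pvDigit? c).getD 0 := by
  unfold pvHorner; rw [List.foldl_append]; simp

-- Main invariant: B's running pair equals (Horner of A's built string, same index);
-- m bounds the combination prefix the remaining 'X's may consume.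
theorem pvMain (combination : List Int) (m : Nat)
    (hcomb : ∀ v ∈ combination.take m, 0 ≤ v ∧ v ≤ 9) (hm : m ≤ combination.length) :
    ∀ (l : List Char) (s : List Char) (ix : Int), 0 ≤ ix → ix.toNat + l.count 'X' ≤ m →
      l.foldl (fun (st : Int × Int) bit =>
          if bit = 'X' then
            (st.1 * 2 + (PySem.List.pyGet? combination st.2).getD 0, st.2 + 1)
          else
            (st.1 * 2 + (pvDigit? bit).getD 0, st.2)) (pvHorner s, ix)
        = (pvHorner (l.foldl (fun (st : List Char × Int) bit =>
            if bit = 'X' then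
              (st.1 ++ PySem.Int.toChars ((PySem.List.pyGet? combination st.2).getD 0), st.2 + 1)
            else
              (st.1 ++ [bit], st.2)) (s, ix)).1,
           (l.foldl (fun (st : List Char × Int) bit =>
            if bit = 'X' then
              (st.1 ++ PySem.Int.toChars ((PySem.List.pyGet? combination st.2).getD 0), st.2 + 1)
            else
              (st.1 ++ [bit], st.2)) (s, ix)).2) := by
  intro l
  induction l with
  | nil => intro s ix _ _; simp
  | cons c t ih =>
    intro s ix hix hcount
    by_cases hc : c = 'X'
    · subst hc
      have hcnt : ix.toNat < m := by
        have : t.count 'X' + 1 = (('X' : Char) :: t).count 'X' := by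
          simp
        omega
      have hilen : ix < (combination.length : Int) := by omega
      have hg : PySem.List.pyGet? combination ix = some combination[ix.toNat] :=
        PySem.List.pyGet?_eq_some_getElem combination hix (by omega)
      have hv : 0 ≤ combination[ix.toNat] ∧ combination[ix.toNat] ≤ 9 := by
        refine hcomb _ ?_
        have hlt : ix.toNat < (combination.take m).length := by
          simp [List.length_take]; omega
        have := List.getElem_mem hlt
        simpa [List.getElem_take] using this
      simp only [List.foldl_cons, if_true]
      rw [hg]
      simp only [Option.getD_some]
      rw [← pvHorner_append_toChars s _ hv.1 hv.2]
      have := ih (s ++ PySem.Int.toChars combination[ix.toNat]) (ix + 1) (by omega)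
        (by
          have : (('X' : Char) :: t).count 'X' = t.count 'X' + 1 := by
            simp
          omega)
      exact this
    · simp only [List.foldl_cons, if_neg hc]
      rw [← pvHorner_append_singleton s c]
      exact ih _ _ hix (by
        have : (c :: t).count 'X' = t.count 'X' := by
          simp [hc]
        omega)

-- ===== VERDICT (by name: the statement is the Claim_ definition above) =====
theorem apply_combination_spec : Claim_equal_apply_combination := by
  intro masked combination _ hpre
  unfold Spec_apply_combination apply_combination apply_combination_alt
  rw [pvBinaryToDecimal_eq_horner]
  have hcomb : ∀ v ∈ combination.take (masked.toList.count 'X'), 0 ≤ v ∧ v ≤ 9 := by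
    simpa using hpre.2.1
  have h := pvMain combination (masked.toList.count 'X') hcomb hpre.2.2 masked.toList [] 0
    le_rfl (by simp)
  have h0 : pvHorner [] = 0 := by simp [pvHorner]
  rw [h0] at h
  rw [h]
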